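-- pv_equiv track=rewrite | github.com/ninameghan/ML_Lab5 | main.py | coeffs_poly3
-- ===== SOURCE A (Python) =====
-- def coeffs_poly3(d: int) -> int:
--     n = 0
--     for i in range(d+1):
--         for j in range(d+1):
--             for k in range(d+1):
--                 if i+j+k <= d:
--                     n += 1
--     return n
-- ===== SOURCE B (Python) =====
-- def coeffs_poly3(d: int) -> int:
--     if d < 0:
--         return 0
--     return (d + 1) * (d + 2) * (d + 3) // 6
-- ===== Notes on version B (the rewrite author's own statement) =====
-- stated objective: faster
-- what changed: replaced the triple nested loop counting triples (i,j,k) in [0,d]^3 with i+j+k<=d by the closed-form tetrahedral-number binomial formula, evaluated directly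
import Mathlib
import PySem

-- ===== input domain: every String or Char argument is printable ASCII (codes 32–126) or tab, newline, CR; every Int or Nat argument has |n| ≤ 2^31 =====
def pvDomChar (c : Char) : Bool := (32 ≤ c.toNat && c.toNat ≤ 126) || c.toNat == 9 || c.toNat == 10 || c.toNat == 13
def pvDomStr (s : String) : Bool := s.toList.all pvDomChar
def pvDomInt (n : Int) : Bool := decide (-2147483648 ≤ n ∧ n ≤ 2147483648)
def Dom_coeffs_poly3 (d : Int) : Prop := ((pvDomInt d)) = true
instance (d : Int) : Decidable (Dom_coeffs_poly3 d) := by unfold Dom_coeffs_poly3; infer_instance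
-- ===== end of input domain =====

-- B replaces A's cubic triple loop by the closed-form tetrahedral-number formula (objective: faster).

-- ===== PORT A =====
def coeffs_poly3 (d : Int) : Int :=
  (PySem.List.pyRange 0 (d+1)).foldl (fun n i =>
    (PySem.List.pyRange 0 (d+1)).foldl (fun n j =>
      (PySem.List.pyRange 0 (d+1)).foldl (fun n k =>
        if i + j + k ≤ d then n + 1 else n) n) n) 0

-- ===== PORT B =====
def coeffs_poly3_alt (d : Int) : Int :=
  if d < 0 then 0 else PySem.Int.floordiv ((d + 1) * (d + 2) * (d + 3)) 6

-- ===== PRECONDITION & SPEC =====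
def Spec_coeffs_poly3 (d : Int) (out : Int) : Prop := out = coeffs_poly3_alt d
instance (d : Int) (out : Int) : Decidable (Spec_coeffs_poly3 d out) := by unfold Spec_coeffs_poly3; infer_instance

-- ===== CLAIM (what is proved, stated in full; the proofs are below) =====
def Claim_equal_coeffs_poly3 : Prop := ∀ (d : Int), Dom_coeffs_poly3 d → Spec_coeffs_poly3 d (coeffs_poly3 d)

-- ===== LEMMAS AND PROOFS =====

-- a foldl that conditionally increments is an init + sum of 0/1 terms
lemma foldl_if_one (l : List Int) (c : Int → Prop) [DecidablePred c] (a : Int) :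
    l.foldl (fun n k => if c k then n + 1 else n) a
      = a + (l.map (fun k => if c k then (1 : Int) else 0)).sum := by
  have h : (fun (n k : Int) => if c k then n + 1 else n)
      = fun n k => n + (if c k then (1 : Int) else 0) := by
    funext n k; split_ifs <;> ring
  rw [h, PySem.List.foldl_add]

-- peel the first element of a sum over range [0, m+1) and reindex
lemma shift_sum (m : Nat) (f : Int → Int) :
    ((PySem.List.pyRange 0 ((m : Int) + 1)).map f).sum
      = f 0 + ((PySem.List.pyRange 0 (m : Int)).map (fun x => f (x + 1))).sum := by
  rw [PySem.List.pyRange_one_cons (by omega), List.map_cons, List.sum_cons]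
  congr 1
  have h1 : PySem.List.pyRange (0 + 1) ((m : Int) + 1)
      = List.map (fun k : Nat => 1 + (k : Int)) (List.range m) := by
    rw [PySem.List.pyRange_one]; norm_num
  have h2 : PySem.List.pyRange 0 (m : Int)
      = List.map (fun k : Nat => 0 + (k : Int)) (List.range m) := by
    rw [PySem.List.pyRange_one]; norm_num
  rw [h1, h2, List.map_map, List.map_map]
  congr 1
  apply List.map_congr_left
  intro k _
  simp only [Function.comp_apply]
  congr 1
  ring

-- how many k in [0, m) satisfy k ≤ c
lemma cnt_sum (m : Nat) (c : Int) :
    ((PySem.List.pyRange 0 (m : Int)).map (fun k => if k ≤ c then (1 : Int) else 0)).sum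
      = max 0 (min (c + 1) (m : Int)) := by
  induction m generalizing c with
  | zero =>
      rw [PySem.List.pyRange_one_eq_nil (by omega)]
      simp
  | succ n ih =>
      push_cast
      rw [shift_sum n (fun k => if k ≤ c then (1 : Int) else 0)]
      have h : (fun x : Int => if x + 1 ≤ c then (1 : Int) else 0)
          = fun x => if x ≤ c - 1 then (1 : Int) else 0 := by
        funext x; split_ifs <;> omega
      simp only [h, ih (c - 1)]
      split_ifs <;> omega

-- triangular sum: Σ_{j=0}^{m-1} max 0 (r - j + 1), for r ≤ m - 1
lemma tri_sum (m : Nat) (r : Int) (h : r ≤ (m : Int) - 1) :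
    2 * ((PySem.List.pyRange 0 (m : Int)).map (fun j => max 0 (r - j + 1))).sum
      = if r < 0 then 0 else (r + 1) * (r + 2) := by
  induction m generalizing r with
  | zero =>
      rw [PySem.List.pyRange_one_eq_nil (by omega)]
      have hr : r < 0 := by omega
      simp [hr]
  | succ n ih =>
      push_cast
      rw [shift_sum n (fun j => max 0 (r - j + 1))]
      have hf : (fun x : Int => max 0 (r - (x + 1) + 1))
          = fun x => max 0 ((r - 1) - x + 1) := by
        funext x; ring_nf
      rw [hf, mul_add, ih (r - 1) (by omega)]
      by_cases h0 : r < 0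
      · have h1 : r - 1 < 0 := by omega
        have h2 : max 0 (r - 0 + 1) = 0 := by omega
        simp [h0, h1]
      · have h2 : max 0 (r - 0 + 1) = r + 1 := by omega
        rw [h2]
        by_cases h3 : r - 1 < 0
        · have hr0 : r = 0 := by omega
          subst hr0; norm_num
        · simp only [if_neg h0, if_neg h3]
          ring

-- Σ_{i=0}^{m-1} (m - i) * (m - i + 1) = m (m+1) (m+2) / 3
lemma cube_sum (m : Nat) :
    3 * ((PySem.List.pyRange 0 (m : Int)).map
          (fun i => ((m : Int) - i) * ((m : Int) - i + 1))).sum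
      = (m : Int) * ((m : Int) + 1) * ((m : Int) + 2) := by
  induction m with
  | zero =>
      rw [PySem.List.pyRange_one_eq_nil (by omega)]
      simp
  | succ n ih =>
      push_cast
      rw [shift_sum n (fun i => ((n : Int) + 1 - i) * ((n : Int) + 1 - i + 1))]
      have hf : (fun x : Int => ((n : Int) + 1 - (x + 1)) * ((n : Int) + 1 - (x + 1) + 1))
          = fun x => ((n : Int) - x) * ((n : Int) - x + 1) := by
        funext x; ring_nf
      rw [hf, mul_add, ih]
      ring

theorem coeffs_poly3_spec : Claim_equal_coeffs_poly3 := by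
  intro d _
  unfold Spec_coeffs_poly3 coeffs_poly3 coeffs_poly3_alt
  by_cases hd : d < 0
  · rw [PySem.List.pyRange_one_eq_nil (by omega)]
    simp [hd]
  · have hd' : 0 ≤ d := by omega
    rw [if_neg (by omega)]
    lift d to ℕ using hd' with m
    set R := PySem.List.pyRange 0 ((m : Int) + 1) with hR
    -- rewrite the triple foldl as a sum of sums of sums
    have e1 : (fun (n i : Int) =>
        R.foldl (fun n j => R.foldl (fun n k => if i + j + k ≤ (m : Int) then n + 1 else n) n) n)
        = fun n i => n + (R.map (fun j =>
            (R.map (fun k => if i + j + k ≤ (m : Int) then (1 : Int) else 0)).sum)).sum := by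
      funext n i
      have einner : (fun (n j : Int) =>
          R.foldl (fun n k => if i + j + k ≤ (m : Int) then n + 1 else n) n)
          = fun n j => n + (R.map (fun k => if i + j + k ≤ (m : Int) then (1 : Int) else 0)).sum := by
        funext n j
        exact foldl_if_one R (fun k => i + j + k ≤ (m : Int)) n
      rw [einner, PySem.List.foldl_add]
    rw [e1, PySem.List.foldl_add, zero_add]
    -- per-i value of the double inner sum
    have hFi : ∀ i ∈ R, 2 * (R.map (fun j =>
        (R.map (fun k => if i + j + k ≤ (m : Int) then (1 : Int) else 0)).sum)).sum
        = ((m : Int) - i + 1) * ((m : Int) - i + 2) := by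
      intro i hi
      rw [PySem.List.mem_pyRange_one] at hi
      have hj : ∀ j ∈ R, (R.map (fun k => if i + j + k ≤ (m : Int) then (1 : Int) else 0)).sum
          = max 0 (((m : Int) - i) - j + 1) := by
        intro j hjm
        rw [PySem.List.mem_pyRange_one] at hjm
        have hc : (fun k : Int => if i + j + k ≤ (m : Int) then (1 : Int) else 0)
            = fun k => if k ≤ (m : Int) - i - j then (1 : Int) else 0 := by
          funext k; split_ifs <;> omega
        rw [hc, hR]
        have hm1 : ((m : Int) + 1) = (((m + 1 : Nat)) : Int) := by push_cast; ring
        rw [hm1, cnt_sum (m + 1) ((m : Int) - i - j)]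
        push_cast
        omega

      rw [List.map_congr_left hj, hR]
      have hm1 : ((m : Int) + 1) = (((m + 1 : Nat)) : Int) := by push_cast; ring
      rw [hm1, tri_sum (m + 1) ((m : Int) - i) (by push_cast; omega)]
      rw [if_neg (by omega)]
    -- combine
    have h2 : 2 * (R.map (fun i => (R.map (fun j =>
        (R.map (fun k => if i + j + k ≤ (m : Int) then (1 : Int) else 0)).sum)).sum)).sum
        = (R.map (fun i => ((m : Int) - i + 1) * ((m : Int) - i + 2))).sum := by
      rw [← List.sum_map_mul_left, List.map_congr_left hFi]
    have h3 : 3 * (R.map (fun i => ((m : Int) - i + 1) * ((m : Int) - i + 2))).sum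
        = ((m : Int) + 1) * ((m : Int) + 2) * ((m : Int) + 3) := by
      have hf : (fun i : Int => ((m : Int) - i + 1) * ((m : Int) - i + 2))
          = fun i => (((m + 1 : Nat) : Int) - i) * (((m + 1 : Nat) : Int) - i + 1) := by
        funext i; push_cast; ring
      rw [hR]
      have hm1 : ((m : Int) + 1) = (((m + 1 : Nat)) : Int) := by push_cast; ring
      rw [hf, hm1, cube_sum (m + 1)]
      push_cast; ring
    set S := (R.map (fun i => (R.map (fun j =>
        (R.map (fun k => if i + j + k ≤ (m : Int) then (1 : Int) else 0)).sum)).sum)).sum with hS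
    have h6 : 6 * S = ((m : Int) + 1) * ((m : Int) + 2) * ((m : Int) + 3) := by
      have : 6 * S = 3 * (2 * S) := by ring
      rw [this, h2, h3]
    rw [eq_comm, PySem.Int.floordiv_eq_iff_of_pos (by omega)]
    constructor <;> nlinarith [h6]
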